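-- pv_equiv track=rewrite | github.com/Jyotir10/Inference-Engine | Inference_Engine.py | again_StdKB
-- ===== SOURCE A (Python) =====
-- def is_variable(x):
--     get_first_char = x[0]
--     if(get_first_char.islower()):
--         return True
--     else:
--         return False
--
-- def make_StdVar(ip_varList,sentence_No,curr_position,var_hm,subst_List):
--     c = 0
--     for v in ip_varList:
--         if (is_variable(v)):
--             if v in var_hm:
--                 ip_varList[c] = var_hm[v]
--             else:
--                 pos = curr_position[0]
--
--                 ip_varList[c] = subst_List[pos]+str(sentence_No)
--                 var_hm[v] = subst_List[pos]+str(sentence_No)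
--                 curr_position[0] += 1
--         else:
--             ip_varList[c] = v
--         c += 1
--     return ip_varList
--
-- def again_StdKB(val,sentence_No):
--
--     # list is tuples of predicates in a sentence which are in conjunction
--     var_hm = dict()
--     curr_position = [0, "currpos"]
--     subst_List = ["a", "b", "c", "d", "e", "f", "g", "h", "i", "j", "k", "l", "m", "n", "o", "p", "q", "r", "s", "t","u", "v", "w", "x", "y", "z"]
--     sentence_Set = set()
--     for pred in val:
--         temp = list(pred)
--         name_Pred = temp[0]
--         var_List = list(temp[1])
--         is_V = temp[2]
--
--         stdList = make_StdVar(var_List,sentence_No,curr_position,var_hm,subst_List)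
--
--         stdList = tuple(stdList)
--         pred_S = (name_Pred,stdList,is_V)
--         sentence_Set.add(pred_S)
--
--     sentence_Set = frozenset(sentence_Set)
--     return sentence_Set
-- ===== SOURCE B (Python) =====
-- def is_variable(x):
--     return x[0].islower()
--
-- def again_StdKB(val, sentence_No):
--     subst_List = ["a", "b", "c", "d", "e", "f", "g", "h", "i", "j", "k", "l", "m",
--                   "n", "o", "p", "q", "r", "s", "t", "u", "v", "w", "x", "y", "z"]
--     # pass 1: assign a fresh standard name to each variable in first-occurrence order
--     subst = {}
--     for pred in val:
--         for v in pred[1]: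
--             if is_variable(v) and v not in subst:
--                 subst[v] = subst_List[len(subst)] + str(sentence_No)
--     # pass 2: rewrite every predicate by pure lookup
--     sentence_Set = set()
--     for name_Pred, var_List, is_V in val:
--         sentence_Set.add((name_Pred, tuple(subst.get(v, v) for v in var_List), is_V))
--     return frozenset(sentence_Set)
-- ===== Notes on version B (the rewrite author's own statement) =====
-- stated objective: alternative
-- what changed: B replaces A's single fused pass (which threads a mutable substitution table, a position counter and a per-predicate rewriting helper through one loop) by two separate passes: pass 1 builds the complete substitution dict in first-occurrence order, pass 2 rewrites each predicate by pure dict lookup.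
import Mathlib
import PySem

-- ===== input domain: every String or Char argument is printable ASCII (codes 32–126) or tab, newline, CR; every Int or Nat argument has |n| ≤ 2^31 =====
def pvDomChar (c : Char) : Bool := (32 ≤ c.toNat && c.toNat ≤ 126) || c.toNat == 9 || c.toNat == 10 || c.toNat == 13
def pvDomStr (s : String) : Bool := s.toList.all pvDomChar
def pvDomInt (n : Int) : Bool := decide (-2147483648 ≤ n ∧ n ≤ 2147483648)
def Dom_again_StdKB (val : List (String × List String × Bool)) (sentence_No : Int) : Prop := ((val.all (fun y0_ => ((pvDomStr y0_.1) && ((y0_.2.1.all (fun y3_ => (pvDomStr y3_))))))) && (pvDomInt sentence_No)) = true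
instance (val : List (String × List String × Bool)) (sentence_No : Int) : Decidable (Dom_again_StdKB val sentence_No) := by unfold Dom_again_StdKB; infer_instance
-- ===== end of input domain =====

-- B separates A's fused standardization pass into two passes (build the substitution table, then apply it by lookup); equal return values on Pre_ (A mutates only local copies).


-- shared helper: is_variable(x) = x[0].islower(); x[0] on "" is an IndexError (excluded by Pre_)
def isVariable (x : String) : Bool :=
  match PySem.Str.pyGet? x 0 with
  | some c => PySem.Chars.islower c
  | none => false

def substList : List String :=
  ["a", "b", "c", "d", "e", "f", "g", "h", "i", "j", "k", "l", "m",
   "n", "o", "p", "q", "r", "s", "t", "u", "v", "w", "x", "y", "z"]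

-- ===== PORT A =====
-- make_StdVar's loop body; state = (output list so far, curr_position[0], var_hm).
-- subst_List[pos] via pyGetD: the default "" is only reached where Python raises IndexError (outside Pre_).
def makeStdVarStep (sentence_No : Int) (r : List String × Int × PySem.Dict String String)
    (v : String) : List String × Int × PySem.Dict String String :=
  if isVariable v then
    match r.2.2.get? v with
    | some w => (r.1 ++ [w], r.2.1, r.2.2)
    | none =>
        (r.1 ++ [PySem.List.pyGetD substList r.2.1 "" ++ PySem.Int.toStr sentence_No],
         r.2.1 + 1,
         r.2.2.insert v (PySem.List.pyGetD substList r.2.1 "" ++ PySem.Int.toStr sentence_No))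
  else (r.1 ++ [v], r.2.1, r.2.2)

def makeStdVar (ipVarList : List String) (sentence_No : Int) (pos : Int)
    (varHm : PySem.Dict String String) : List String × Int × PySem.Dict String String :=
  ipVarList.foldl (makeStdVarStep sentence_No) ([], pos, varHm)

def again_StdKB (val : List (String × List String × Bool)) (sentence_No : Int) :
    List (String × List String × Bool) :=
  (val.foldl
    (fun (st : PySem.Set (String × List String × Bool) × Int × PySem.Dict String String) pred =>
      let r := makeStdVar pred.2.1 sentence_No st.2.1 st.2.2
      (PySem.Set.add st.1 (pred.1, r.1, pred.2.2), r.2.1, r.2.2))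
    (PySem.Set.empty, 0, PySem.Dict.empty)).1

-- ===== PORT B =====
-- pass 1: build the whole substitution table in first-occurrence order
def buildStep (sentence_No : Int) (m : PySem.Dict String String) (v : String) :
    PySem.Dict String String :=
  if isVariable v && !(m.contains v) then
    m.insert v (PySem.List.pyGetD substList ((m.size : Int)) "" ++ PySem.Int.toStr sentence_No)
  else m

def buildSubst (val : List (String × List String × Bool)) (sentence_No : Int) :
    PySem.Dict String String :=
  val.foldl (fun m pred => pred.2.1.foldl (buildStep sentence_No) m) PySem.Dict.empty

def again_StdKB_alt (val : List (String × List String × Bool)) (sentence_No : Int) :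
    List (String × List String × Bool) :=
  let subst := buildSubst val sentence_No
  val.foldl
    (fun s pred => PySem.Set.add s (pred.1, pred.2.1.map (fun v => subst.getD v v), pred.2.2))
    PySem.Set.empty

-- ===== PRECONDITION & SPEC =====
-- Pre_ excludes exactly the inputs where Python A raises IndexError: an empty variable
-- string (x[0] in is_variable) or more than 26 distinct variables (subst_List[26]).
def Pre_again_StdKB (val : List (String × List String × Bool)) (sentence_No : Int) : Prop :=
  (∀ p ∈ val, ∀ v ∈ p.2.1, v ≠ "") ∧
  (PySem.List.dedup ((val.flatMap (fun p => p.2.1)).filter isVariable)).length ≤ 26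

instance (val : List (String × List String × Bool)) (sentence_No : Int) :
    Decidable (Pre_again_StdKB val sentence_No) := by unfold Pre_again_StdKB; infer_instance

def pvWitness_again_StdKB : (List (String × List String × Bool)) × Int :=
  ([("P", ["x", "Bob"], true), ("Q", ["y", "x"], false)], 3)

def Spec_again_StdKB (val : List (String × List String × Bool)) (sentence_No : Int)
    (out : List (String × List String × Bool)) : Prop := out = again_StdKB_alt val sentence_No
instance (val : List (String × List String × Bool)) (sentence_No : Int) (out : List (String × List String × Bool)) : Decidable (Spec_again_StdKB val sentence_No out) := by unfold Spec_again_StdKB; infer_instance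

-- ===== CLAIM (what is proved, stated in full; the proofs are below) =====
def Claim_equal_again_StdKB : Prop := ∀ (val : List (String × List String × Bool)) (sentence_No : Int), Dom_again_StdKB val sentence_No → Pre_again_StdKB val sentence_No → Spec_again_StdKB val sentence_No (again_StdKB val sentence_No)

-- ===== LEMMAS AND PROOFS =====

-- one buildStep never deletes or overwrites an existing binding
theorem get?_buildStep_of_some {n : Int} {m : PySem.Dict String String} {k : String} {w : String}
    (h : m.get? k = some w) (v : String) : (buildStep n m v).get? k = some w := by
  unfold buildStep
  split
  · rcases eq_or_ne k v with rfl | hne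
    · have : m.contains k = true := by
        rw [PySem.Dict.contains_eq_isSome_get?, h]; rfl
      simp_all
    · rw [PySem.Dict.get?_insert_of_ne _ _ hne]; exact h
  · exact h

-- a whole pass-1 fold never deletes or overwrites an existing binding
theorem get?_foldl_buildStep_of_some {n : Int} (l : List String)
    {m : PySem.Dict String String} {k w : String} (h : m.get? k = some w) :
    (l.foldl (buildStep n) m).get? k = some w := by
  induction l generalizing m with
  | nil => exact h
  | cons v l ih => exact ih (get?_buildStep_of_some h v)

theorem get?_buildFold_of_some {n : Int} (val : List (String × List String × Bool))
    {m : PySem.Dict String String} {k w : String} (h : m.get? k = some w) :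
    (val.foldl (fun m p => p.2.1.foldl (buildStep n) m) m).get? k = some w := by
  induction val generalizing m with
  | nil => exact h
  | cons p val ih => exact ih (get?_foldl_buildStep_of_some _ h)

-- every key the table ever holds is a variable
theorem contains_foldl_buildStep_var {n : Int} (l : List String)
    (m : PySem.Dict String String) (hm : ∀ k, m.contains k = true → isVariable k = true)
    (k : String) (h : (l.foldl (buildStep n) m).contains k = true) : isVariable k = true := by
  induction l generalizing m with
  | nil => exact hm k h
  | cons v l ih =>
      refine ih (buildStep n m v) ?_ h
      intro k' hk'
      unfold buildStep at hk'
      by_cases hcond : (isVariable v && !m.contains v) = true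
      · rw [if_pos hcond, PySem.Dict.contains_insert] at hk'
        rcases Bool.or_eq_true_iff.mp hk' with h1 | h1
        · have hkv : k' = v := by simpa using h1
          subst hkv
          exact (Bool.and_eq_true_iff.mp hcond).1
        · exact hm _ h1
      · rw [if_neg hcond] at hk'
        exact hm _ hk'

theorem contains_buildSubst_var {n : Int} (val : List (String × List String × Bool))
    (m : PySem.Dict String String) (hm : ∀ k, m.contains k = true → isVariable k = true)
    (k : String) (h : (val.foldl (fun m p => p.2.1.foldl (buildStep n) m) m).contains k = true) :
    isVariable k = true := by
  induction val generalizing m with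
  | nil => exact hm k h
  | cons p val ih =>
      simp only [List.foldl_cons] at h
      exact ih (p.2.1.foldl (buildStep n) m)
        (fun k' hk' => contains_foldl_buildStep_var p.2.1 m hm k' hk') h

-- core per-variable-list lemma: A's fused rewrite-and-record pass over one variable list,
-- started at pos = size of the table, equals pure lookup in any table M that extends the
-- table pass 1 produces from the same start; the threaded state stays aligned with pass 1.
theorem makeStd_eq (n : Int) (vs : List String) (acc : List String)
    (hm M : PySem.Dict String String)
    (hext : ∀ k w, (vs.foldl (buildStep n) hm).get? k = some w → M.get? k = some w)
    (hvar : ∀ k, M.contains k = true → isVariable k = true) :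
    vs.foldl (makeStdVarStep n) (acc, ((hm.size : Int)), hm)
      = (acc ++ vs.map (fun v => M.getD v v),
         ((vs.foldl (buildStep n) hm).size : Int), vs.foldl (buildStep n) hm) := by
  induction vs generalizing acc hm with
  | nil => simp
  | cons v vs ih =>
      by_cases hv : isVariable v = true
      · rcases hh : hm.get? v with _ | w
        · -- fresh variable: both sides insert the same binding
          have hc : hm.contains v = false := by
            rw [PySem.Dict.contains_eq_isSome_get?, hh]; rfl
          have hb : buildStep n hm v
              = hm.insert v (PySem.List.pyGetD substList ((hm.size : Int)) "" ++ PySem.Int.toStr n) := by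
            unfold buildStep; rw [hv, hc]; rfl
          have hsz : (((buildStep n hm v).size : Int)) = ((hm.size : Int)) + 1 := by
            rw [hb, PySem.Dict.size_insert, hc]; simp
          have hM : M.getD v v
              = PySem.List.pyGetD substList ((hm.size : Int)) "" ++ PySem.Int.toStr n := by
            refine PySem.Dict.getD_of_get?_eq_some _ _ (hext _ _ ?_)
            refine get?_foldl_buildStep_of_some vs ?_
            rw [hb]; exact PySem.Dict.get?_insert_self _ _ _
          have hstep : makeStdVarStep n (acc, ((hm.size : Int)), hm) v
              = (acc ++ [PySem.List.pyGetD substList ((hm.size : Int)) "" ++ PySem.Int.toStr n],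
                 ((hm.size : Int)) + 1,
                 hm.insert v (PySem.List.pyGetD substList ((hm.size : Int)) "" ++ PySem.Int.toStr n)) := by
            simp [makeStdVarStep, hv, hh]
          rw [List.foldl_cons, hstep]
          have hrec := ih (acc ++ [PySem.List.pyGetD substList ((hm.size : Int)) "" ++ PySem.Int.toStr n])
            (buildStep n hm v) (fun k w h => hext k w h)
          rw [hsz, hb] at hrec
          rw [hrec]
          simp [List.foldl_cons, hb, hM]
        · -- already-recorded variable: value is preserved into M
          have hb : buildStep n hm v = hm := by
            have hc : hm.contains v = true := by
              rw [PySem.Dict.contains_eq_isSome_get?, hh]; rfl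
            unfold buildStep; rw [hv, hc]; rfl
          have hM : M.getD v v = w := by
            refine PySem.Dict.getD_of_get?_eq_some _ _ (hext _ _ ?_)
            refine get?_foldl_buildStep_of_some vs ?_
            rw [hb]; exact hh
          have hstep : makeStdVarStep n (acc, ((hm.size : Int)), hm) v
              = (acc ++ [w], ((hm.size : Int)), hm) := by
            simp [makeStdVarStep, hv, hh]
          rw [List.foldl_cons, hstep]
          have hrec := ih (acc ++ [w]) hm
            (fun k w' h => hext k w' (by rw [List.foldl_cons, hb]; exact h))
          rw [hrec]
          simp [List.foldl_cons, hb, hM]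
      · -- non-variable: left in place; it can never be a key of M
        have hv' : isVariable v = false := by simpa using hv
        have hb : buildStep n hm v = hm := by
          unfold buildStep; rw [hv']; rfl
        have hMc : M.contains v = false := by
          rcases h : M.contains v with _ | _
          · rfl
          · exact absurd (hvar v h) (by simp [hv'])
        have hM : M.getD v v = v := PySem.Dict.getD_of_not_contains _ _ hMc
        have hstep : makeStdVarStep n (acc, ((hm.size : Int)), hm) v
            = (acc ++ [v], ((hm.size : Int)), hm) := by
          simp [makeStdVarStep, hv']
        rw [List.foldl_cons, hstep]
        have hrec := ih (acc ++ [v]) hm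
          (fun k w' h => hext k w' (by rw [List.foldl_cons, hb]; exact h))
        rw [hrec]
        simp [List.foldl_cons, hb, hM]

-- main fold alignment: A's fused fold over the predicates, with table state hm and
-- position = its size, produces the same element sequence as pass-2 lookup in M.
theorem main_fold (n : Int) (M : PySem.Dict String String)
    (val : List (String × List String × Bool)) :
    ∀ (s : PySem.Set (String × List String × Bool)) (hm : PySem.Dict String String),
    (∀ k w, (val.foldl (fun m p => p.2.1.foldl (buildStep n) m) hm).get? k = some w →
      M.get? k = some w) →
    (∀ k, M.contains k = true → isVariable k = true) →
    (val.foldl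
      (fun (st : PySem.Set (String × List String × Bool) × Int × PySem.Dict String String) pred =>
        let r := makeStdVar pred.2.1 n st.2.1 st.2.2
        (PySem.Set.add st.1 (pred.1, r.1, pred.2.2), r.2.1, r.2.2))
      (s, ((hm.size : Int)), hm)).1
      = val.foldl
          (fun s pred => PySem.Set.add s (pred.1, pred.2.1.map (fun v => M.getD v v), pred.2.2)) s := by
  induction val with
  | nil => intro s hm _ _; rfl
  | cons p val ih =>
      intro s hm hext hvar
      have hext' : ∀ k w, (p.2.1.foldl (buildStep n) hm).get? k = some w → M.get? k = some w :=
        fun k w h => hext k w (get?_buildFold_of_some val h)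
      have hp := makeStd_eq n p.2.1 [] hm M hext' hvar
      have hmk : makeStdVar p.2.1 n ((hm.size : Int)) hm
          = (p.2.1.map (fun v => M.getD v v),
             (((p.2.1.foldl (buildStep n) hm).size : Int)), p.2.1.foldl (buildStep n) hm) := by
        unfold makeStdVar; rw [hp]; simp
      simp only [List.foldl_cons, hmk]
      exact ih (PySem.Set.add s (p.1, p.2.1.map (fun v => M.getD v v), p.2.2))
        (p.2.1.foldl (buildStep n) hm) hext hvar

-- ===== VERDICT (by name: the statement is the Claim_ definition above) =====
theorem again_StdKB_spec : Claim_equal_again_StdKB := by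
  intro val n _ _
  show again_StdKB val n = again_StdKB_alt val n
  unfold again_StdKB again_StdKB_alt
  have hvars : ∀ k, (buildSubst val n).contains k = true → isVariable k = true :=
    fun k h => contains_buildSubst_var val PySem.Dict.empty
      (fun k' hk' => by simp [PySem.Dict.contains_empty] at hk') k h
  have := main_fold n (buildSubst val n) val PySem.Set.empty PySem.Dict.empty
    (fun k w h => h) hvars
  simpa using this
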